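-- pv_equiv track=rewrite | github.com/webclinic017/live-system-PUBLIC | src/helpers/configs.py | getExchange
-- ===== SOURCE A (Python) =====
-- def getExchange(ticker):
--     exchanges = (("GLOBEX", ['GE','ES','MES','NQ','MNQ','EUR','CAD','AUD']),
--                   ("ECBOT", ['ZC','ZW','ZS','ZN']),
--                   ("NYMEX", ['GC','MGC','SI','CL','NG','PA','HG']),
--                   ("CFE", ['VIX'])
--                   )
--     exchange = next((x[0] for x in exchanges if ticker in x[1]), None)
--     return exchange
-- ===== SOURCE B (Python) =====
-- _EXCHANGE_BY_TICKER = {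
--     'GE': 'GLOBEX', 'ES': 'GLOBEX', 'MES': 'GLOBEX', 'NQ': 'GLOBEX',
--     'MNQ': 'GLOBEX', 'EUR': 'GLOBEX', 'CAD': 'GLOBEX', 'AUD': 'GLOBEX',
--     'ZC': 'ECBOT', 'ZW': 'ECBOT', 'ZS': 'ECBOT', 'ZN': 'ECBOT',
--     'GC': 'NYMEX', 'MGC': 'NYMEX', 'SI': 'NYMEX', 'CL': 'NYMEX',
--     'NG': 'NYMEX', 'PA': 'NYMEX', 'HG': 'NYMEX',
--     'VIX': 'CFE',
-- }
--
-- def getExchange(ticker):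
--     return _EXCHANGE_BY_TICKER.get(ticker)
-- ===== Notes on version B (the rewrite author's own statement) =====
-- stated objective: simpler
-- what changed: Replaces the per-call scan over grouped (exchange, ticker-list) tuples with a flat literal ticker->exchange dict; the call is a single dict lookup, correct because no ticker occurs in two groups.
import Mathlib
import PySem

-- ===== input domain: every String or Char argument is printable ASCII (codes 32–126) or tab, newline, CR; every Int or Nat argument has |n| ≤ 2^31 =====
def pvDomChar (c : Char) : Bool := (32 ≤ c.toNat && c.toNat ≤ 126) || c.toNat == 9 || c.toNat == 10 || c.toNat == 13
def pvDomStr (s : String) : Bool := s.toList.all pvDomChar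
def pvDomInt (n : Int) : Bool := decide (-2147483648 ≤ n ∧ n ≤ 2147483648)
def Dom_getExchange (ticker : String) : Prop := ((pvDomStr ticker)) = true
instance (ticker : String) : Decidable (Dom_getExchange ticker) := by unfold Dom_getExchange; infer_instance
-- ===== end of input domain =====

-- B replaces A's per-call scan of grouped tuples with a single lookup in a flat literal ticker→exchange dict.

-- ===== PORT A =====
def exchangesA : List (String × List String) :=
  [("GLOBEX", ["GE","ES","MES","NQ","MNQ","EUR","CAD","AUD"]),
   ("ECBOT", ["ZC","ZW","ZS","ZN"]),
   ("NYMEX", ["GC","MGC","SI","CL","NG","PA","HG"]),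
   ("CFE", ["VIX"])]

-- next((x[0] for x in exchanges if ticker in x[1]), None)
def getExchange (ticker : String) : Option String :=
  (exchangesA.find? (fun x => x.2.contains ticker)).map (·.1)

-- ===== PORT B =====
-- module-level literal flat dict ticker → exchange
def exchangeByTicker : PySem.Dict String String :=
  PySem.Dict.mk
    [("GE","GLOBEX"),("ES","GLOBEX"),("MES","GLOBEX"),("NQ","GLOBEX"),
     ("MNQ","GLOBEX"),("EUR","GLOBEX"),("CAD","GLOBEX"),("AUD","GLOBEX"),
     ("ZC","ECBOT"),("ZW","ECBOT"),("ZS","ECBOT"),("ZN","ECBOT"),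
     ("GC","NYMEX"),("MGC","NYMEX"),("SI","NYMEX"),("CL","NYMEX"),
     ("NG","NYMEX"),("PA","NYMEX"),("HG","NYMEX"),
     ("VIX","CFE")]

def getExchange_alt (ticker : String) : Option String :=
  exchangeByTicker.get? ticker

-- ===== PRECONDITION & SPEC =====
def Spec_getExchange (ticker : String) (out : Option String) : Prop := out = getExchange_alt ticker
instance (ticker : String) (out : Option String) : Decidable (Spec_getExchange ticker out) := by unfold Spec_getExchange; infer_instance

-- ===== CLAIM =====
def Claim_equal_getExchange : Prop := ∀ (ticker : String), Dom_getExchange ticker → Spec_getExchange ticker (getExchange ticker)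

-- ===== LEMMAS AND PROOFS =====
def allTickers : List String :=
  ["GE","ES","MES","NQ","MNQ","EUR","CAD","AUD","ZC","ZW","ZS","ZN",
   "GC","MGC","SI","CL","NG","PA","HG","VIX"]

theorem known_case : ∀ t ∈ allTickers, getExchange t = getExchange_alt t := by decide

theorem unknown_case (t : String) (h : t ∉ allTickers) : getExchange t = getExchange_alt t := by
  simp only [allTickers, List.mem_cons, List.not_mem_nil, or_false, not_or] at h
  obtain ⟨h1,h2,h3,h4,h5,h6,h7,h8,h9,h10,h11,h12,h13,h14,h15,h16,h17,h18,h19,h20⟩ := h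
  have hA : getExchange t = none := by
    simp [getExchange, exchangesA, List.contains_eq_mem,
      h1, h2, h3, h4, h5, h6, h7, h8, h9, h10,
      h11, h12, h13, h14, h15, h16, h17, h18, h19, h20]
  have hB : getExchange_alt t = none := by
    simp [getExchange_alt, exchangeByTicker, PySem.Dict.get?,
      Ne.symm h1, Ne.symm h2, Ne.symm h3, Ne.symm h4, Ne.symm h5, Ne.symm h6, Ne.symm h7,
      Ne.symm h8, Ne.symm h9, Ne.symm h10, Ne.symm h11, Ne.symm h12, Ne.symm h13, Ne.symm h14,
      Ne.symm h15, Ne.symm h16, Ne.symm h17, Ne.symm h18, Ne.symm h19, Ne.symm h20]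
  rw [hA, hB]

-- ===== VERDICT =====
theorem getExchange_spec : Claim_equal_getExchange := by
  intro t _
  unfold Spec_getExchange
  by_cases h : t ∈ allTickers
  · exact known_case t h
  · exact unknown_case t h
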